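-- pv_equiv track=rewrite | github.com/switchball/zhuan-solver | app/zhuan/board_state.py | _available_moves_by_line
-- ===== SOURCE A (Python) =====
-- def _available_moves_by_line(line_elements: list) -> list:
--     """
--     返回给定行列上所有的移动位置列表。
--
--     :param line_elements: 一条的数据数组
--     :return: 可用移动位置列表 [(start_idx, end_idx), ...]
--     """
--     n = len(line_elements)
--     left_moves = [0] * n
--     right_moves = [0] * n
--
--     # 第一次扫描：计算每个 tile 可以向左或向右移动的最大数目
--     left_zero_index = -1
--     left_zero_eof = -1
--     left_crt_moves = 0
--     right_zero_index = n
--     right_zero_eof = n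
--     right_crt_moves = 0
--
--     for i in range(n):
--         # 计算向左移动的最大步数
--         if line_elements[i] != 0:
--             left_moves[i] = left_crt_moves
--             left_zero_eof = i
--         else:
--             left_zero_index = i
--             left_crt_moves = left_zero_eof - left_zero_index
--
--         # 计算向右移动的最大步数
--         j = n - 1 - i
--         if line_elements[j] != 0:
--             right_moves[j] = right_crt_moves
--             right_zero_eof = j
--         else:
--             right_zero_index = j
--             right_crt_moves = right_zero_eof - right_zero_index
--
--     # 第二次扫描：根据向左向右最大格数生成 move pairs
--     moves = []
--     for i in range(n):
--         if line_elements[i] != 0: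
--             # 向左/右移动，包括移动0格
--             for step in range(left_moves[i], right_moves[i] + 1):
--                 moves.append((i, i + step))
--
--     return moves
-- ===== SOURCE B (Python) =====
-- def _available_moves_by_line(line_elements: list) -> list:
--     """Single left-to-right pass over maximal nonzero blocks; no per-index
--     left/right arrays: for a block preceded by L zeros and followed by R zeros,
--     every tile t in the block yields (t, t+s) for s in range(-L, R+1)."""
--     moves = []
--     n = len(line_elements)
--     i = 0
--     L = 0
--     while i < n:
--         if line_elements[i] == 0:
--             i += 1
--             L += 1
--         else:
--             j = i
--             while j < n and line_elements[j] != 0: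
--                 j += 1
--             k = j
--             while k < n and line_elements[k] == 0:
--                 k += 1
--             R = k - j
--             for t in range(i, j):
--                 for s in range(-L, R + 1):
--                     moves.append((t, t + s))
--             i = k
--             L = R
--     return moves
-- ===== Notes on version B (the rewrite author's own statement) =====
-- stated objective: simpler
-- what changed: B drops A's left_moves/right_moves arrays and its two-direction prefix scan, and instead makes one left-to-right pass over maximal nonzero blocks: for each block it counts the zeros immediately before (carried forward) and after it and emits (t, t+s) for every tile t in the block and s in range(-L, R+1).
import Mathlib
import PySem

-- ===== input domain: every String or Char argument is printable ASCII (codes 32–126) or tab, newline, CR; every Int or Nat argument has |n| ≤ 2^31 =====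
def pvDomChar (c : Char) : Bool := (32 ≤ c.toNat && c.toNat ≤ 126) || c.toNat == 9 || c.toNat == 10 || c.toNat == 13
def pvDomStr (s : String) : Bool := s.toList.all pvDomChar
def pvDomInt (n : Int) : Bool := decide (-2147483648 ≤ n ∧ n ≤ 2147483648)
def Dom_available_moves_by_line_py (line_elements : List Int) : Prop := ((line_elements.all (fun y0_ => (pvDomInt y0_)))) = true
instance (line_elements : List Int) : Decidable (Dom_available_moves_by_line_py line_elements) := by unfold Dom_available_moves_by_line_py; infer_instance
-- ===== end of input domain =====

-- B replaces A's two-direction prefix scan and the left_moves/right_moves arrays by one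
-- left-to-right pass over maximal nonzero blocks (simpler; same exact output).

-- ===== PORT A =====
-- left half of the loop body: state (left_moves, left_zero_index, left_zero_eof, left_crt_moves)
def aStepL (xs : List Int) (st : List Int × Int × Int × Int) (i : Nat) : List Int × Int × Int × Int :=
  match st with
  | (lm, lzi, lze, lcm) =>
    -- line_elements[i]: i < n always here, so plain list indexing is exact
    if xs.getD i 0 ≠ 0 then (lm.set i lcm, lzi, (i : Int), lcm)
    else (lm, (i : Int), lze, lze - (i : Int))

-- right half of the loop body: j = n - 1 - i (i < n, so Nat subtraction is exact);
-- state (right_moves, right_zero_index, right_zero_eof, right_crt_moves)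
def aStepR (xs : List Int) (n : Nat) (st : List Int × Int × Int × Int) (i : Nat) : List Int × Int × Int × Int :=
  let j := n - 1 - i
  match st with
  | (rm, rzi, rze, rcm) =>
    if xs.getD j 0 ≠ 0 then (rm.set j rcm, rzi, (j : Int), rcm)
    else (rm, (j : Int), rze, rze - (j : Int))

def available_moves_by_line_py (line_elements : List Int) : List (Int × Int) :=
  let n := line_elements.length
  -- first scan: one loop updating the left-direction and right-direction variables
  let st := (List.range n).foldl
    (fun s i => (aStepL line_elements s.1 i, aStepR line_elements n s.2 i))
    ((List.replicate n 0, (-1 : Int), (-1 : Int), (0 : Int)),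
     (List.replicate n 0, (n : Int), (n : Int), (0 : Int)))
  let lm := st.1.1
  let rm := st.2.1
  -- second scan: generate move pairs
  (List.range n).foldl
    (fun moves i =>
      if line_elements.getD i 0 ≠ 0 then
        moves ++ (PySem.List.pyRange (lm.getD i 0) (rm.getD i 0 + 1) 1).map
          (fun step => ((i : Int), (i : Int) + step))
      else moves) []

-- ===== PORT B =====
-- the while-loop of Source B as structural recursion: i = absolute index of xs within the
-- original line, L = number of zeros immediately before position i
def altGo (i L : Nat) (xs : List Int) : List (Int × Int) :=
  match xs with
  | [] => []
  | x :: rest =>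
    if x == 0 then altGo (i + 1) (L + 1) rest
    else
      -- block of nonzero tiles starting at i (x itself plus the nonzero run after it)
      let blk := x :: rest.takeWhile (fun y => y != 0)
      let after := rest.dropWhile (fun y => y != 0)
      -- R = number of zeros immediately after the block
      let R := (after.takeWhile (fun y => y == 0)).length
      let rest2 := after.dropWhile (fun y => y == 0)
      (List.range blk.length).flatMap
        (fun t => (PySem.List.pyRange (-(L : Int)) ((R : Int) + 1) 1).map
          (fun s => (((i + t : Nat) : Int), ((i + t : Nat) : Int) + s)))
      ++ altGo (i + blk.length + R) R rest2
termination_by xs.length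
decreasing_by
  all_goals simp only [List.length_cons]
  · omega
  · have h1 := List.length_dropWhile_le (fun (y : Int) => y != 0) rest
    have h2 := List.length_dropWhile_le (fun (y : Int) => y == 0)
      (rest.dropWhile (fun y => y != 0))
    omega

def available_moves_by_line_py_alt (line_elements : List Int) : List (Int × Int) :=
  altGo 0 0 line_elements

-- ===== PRECONDITION & SPEC =====
def Spec_available_moves_by_line_py (line_elements : List Int) (out : List (Int × Int)) : Prop := out = available_moves_by_line_py_alt line_elements
instance (line_elements : List Int) (out : List (Int × Int)) : Decidable (Spec_available_moves_by_line_py line_elements out) := by unfold Spec_available_moves_by_line_py; infer_instance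

-- ===== CLAIM (what is proved, stated in full; the proofs are below) =====
def Claim_equal_available_moves_by_line_py : Prop := ∀ (line_elements : List Int), Dom_available_moves_by_line_py line_elements → Spec_available_moves_by_line_py line_elements (available_moves_by_line_py line_elements)

-- ===== LEMMAS AND PROOFS =====

-- length of the leading zero run of a list
def zHead (ys : List Int) : Nat := (ys.takeWhile (fun y => y == 0)).length
-- length of the leading nonzero run
def nzHead (ys : List Int) : Nat := (ys.takeWhile (fun y => y != 0)).length
def zTail (ys : List Int) : Nat := zHead ys.reverse
def nzTail (ys : List Int) : Nat := nzHead ys.reverse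
-- length of the FIRST zero run of ys (0 if ys has no zero)
def fzRun (ys : List Int) : Nat := zHead (ys.dropWhile (fun y => y != 0))
-- length of the LAST zero run of ys (0 if ys has no zero)
def lzRun (ys : List Int) : Nat := fzRun ys.reverse

-- for a nonzero tile at index i: zeros available to its left / right (the run next to its block)
def Lrun (xs : List Int) (i : Nat) : Nat := lzRun (xs.take i)
def Rrun (xs : List Int) (i : Nat) : Nat := fzRun (xs.drop (i + 1))

-- per-index contribution both programs produce
def specF (xs : List Int) (i : Nat) : List (Int × Int) :=
  if xs.getD i 0 ≠ 0 then
    (PySem.List.pyRange (-(Lrun xs i : Int)) ((Rrun xs i : Int) + 1) 1).map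
      (fun s => ((i : Int), (i : Int) + s))
  else []

theorem zHead_cons_zero (ys : List Int) : zHead (0 :: ys) = zHead ys + 1 := by
  simp [zHead]

theorem zHead_cons_ne {x : Int} (hx : x ≠ 0) (ys : List Int) : zHead (x :: ys) = 0 := by
  simp [zHead, hx]

theorem zHead_append_all_zero {zs : List Int} (h : ∀ y ∈ zs, y = 0) (w : List Int) :
    zHead (zs ++ w) = zs.length + zHead w := by
  induction zs with
  | nil => simp
  | cons a t ih =>
    have ha : a = 0 := h a (by simp)
    subst ha
    rw [List.cons_append, zHead_cons_zero, ih (fun y hy => h y (by simp [hy]))]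
    simp [List.length_cons]; omega

theorem zHead_eq_zero_of (l : List Int) (h : l.getD 0 1 ≠ 0) : zHead l = 0 := by
  cases l with
  | nil => rfl
  | cons a t => exact zHead_cons_ne (by simpa using h) t

theorem nzHead_cons_zero (ys : List Int) : nzHead (0 :: ys) = 0 := by
  simp [nzHead]

theorem nzHead_cons_ne {x : Int} (hx : x ≠ 0) (ys : List Int) :
    nzHead (x :: ys) = nzHead ys + 1 := by
  simp [nzHead, hx]

theorem fzRun_cons_zero (ys : List Int) : fzRun (0 :: ys) = zHead ys + 1 := by
  simp [fzRun]
  exact zHead_cons_zero ys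

theorem fzRun_cons_ne {x : Int} (hx : x ≠ 0) (ys : List Int) : fzRun (x :: ys) = fzRun ys := by
  simp [fzRun, hx]

theorem fzRun_append_all_ne {u : List Int} (h : ∀ y ∈ u, y ≠ 0) (w : List Int) :
    fzRun (u ++ w) = fzRun w := by
  induction u with
  | nil => simp
  | cons a t ih =>
    rw [List.cons_append, fzRun_cons_ne (h a (by simp)), ih (fun y hy => h y (by simp [hy]))]

theorem lzRun_append_all_ne {u : List Int} (h : ∀ y ∈ u, y ≠ 0) (w : List Int) :
    lzRun (w ++ u) = lzRun w := by
  unfold lzRun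
  rw [List.reverse_append]
  exact fzRun_append_all_ne (fun y hy => h y (by simpa using hy)) _

theorem lzRun_append_zero (w : List Int) : lzRun (w ++ [0]) = zTail w + 1 := by
  unfold lzRun zTail
  rw [List.reverse_append]
  simpa using fzRun_cons_zero w.reverse

theorem lzRun_eq_zTail_of_pos {w : List Int} (h : 0 < zTail w) : lzRun w = zTail w := by
  unfold lzRun zTail at *
  cases hw : w.reverse with
  | nil => rw [hw] at h; simp [zHead] at h
  | cons a t =>
    rw [hw] at h
    by_cases ha : a = 0
    · subst ha
      rw [fzRun_cons_zero, zHead_cons_zero]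
    · rw [zHead_cons_ne ha] at h; omega

theorem zTail_append_zero (w : List Int) : zTail (w ++ [0]) = zTail w + 1 := by
  unfold zTail
  rw [List.reverse_append]
  simpa using zHead_cons_zero w.reverse

theorem zTail_append_ne {x : Int} (hx : x ≠ 0) (w : List Int) : zTail (w ++ [x]) = 0 := by
  unfold zTail
  rw [List.reverse_append]
  simpa using zHead_cons_ne hx w.reverse

theorem nzTail_append_zero (w : List Int) : nzTail (w ++ [0]) = 0 := by
  unfold nzTail
  rw [List.reverse_append]
  simpa using nzHead_cons_zero w.reverse

theorem nzTail_append_ne {x : Int} (hx : x ≠ 0) (w : List Int) :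
    nzTail (w ++ [x]) = nzTail w + 1 := by
  unfold nzTail
  rw [List.reverse_append]
  simpa using nzHead_cons_ne hx w.reverse

theorem zTail_append_all_zero {zs : List Int} (h : ∀ y ∈ zs, y = 0) (w : List Int) :
    zTail (w ++ zs) = zs.length + zTail w := by
  unfold zTail
  rw [List.reverse_append]
  rw [zHead_append_all_zero (fun y hy => h y (by simpa using hy))]
  simp

theorem zTail_append_all_ne_of_ne_nil {blk : List Int} (hne : blk ≠ [])
    (h : ∀ y ∈ blk, y ≠ 0) (w : List Int) : zTail (w ++ blk) = 0 := by
  unfold zTail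
  rw [List.reverse_append]
  apply zHead_eq_zero_of
  cases hb : blk.reverse with
  | nil => exact absurd (by simpa using hb) hne
  | cons a t =>
    have ha : a ∈ blk := by
      have : a ∈ blk.reverse := by rw [hb]; simp
      simpa using this
    simp [h a ha]

-- if the zero-run taken from `aft` is empty, `aft` (a dropWhile-(≠0) result) must be empty
theorem aft_nil_of_zs_nil {rest : List Int}
    (h : (rest.dropWhile (fun y => y != 0)).takeWhile (fun y => y == 0) = []) :
    rest.dropWhile (fun y => y != 0) = [] := by
  cases haft : rest.dropWhile (fun y => y != 0) with
  | nil => rfl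
  | cons a t =>
    have hh := List.head?_dropWhile_not (fun y => y != 0) rest
    rw [haft] at hh
    simp at hh
    rw [haft] at h
    simp [hh] at h

theorem zHead_of_dropWhile_eq (w u : List Int) (h : u = w.dropWhile (fun y => y == 0)) :
    zHead u = 0 := by
  cases hu : u with
  | nil => rfl
  | cons a t =>
    have hh := List.head?_dropWhile_not (fun y => y == 0) w
    rw [← h, hu] at hh
    simp at hh
    exact zHead_cons_ne hh t

theorem altGo_eq (xs : List Int) :
    ∀ (m i L : Nat), (xs.drop i).length ≤ m →
      L = zTail (xs.take i) →
      (lzRun (xs.take i) = L ∨ (xs.drop i).getD 0 0 = 0) →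
      altGo i L (xs.drop i) = (List.range' i (xs.length - i)).flatMap (specF xs) := by
  intro m
  induction m with
  | zero =>
    intro i L hlen _ _
    have hnil : xs.drop i = [] := List.length_eq_zero_iff.mp (Nat.le_zero.mp hlen)
    have hge : xs.length ≤ i := List.drop_eq_nil_iff.mp hnil
    rw [hnil, Nat.sub_eq_zero_of_le hge]
    simp [altGo]
  | succ m ih =>
    intro i L hlen hL hlz
    cases hdrop : xs.drop i with
    | nil =>
      have hge : xs.length ≤ i := List.drop_eq_nil_iff.mp hdrop
      rw [Nat.sub_eq_zero_of_le hge]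
      simp [altGo]
    | cons x rest =>
      have hlt : i < xs.length := by
        by_contra hcon
        rw [List.drop_eq_nil_iff.mpr (Nat.le_of_not_lt hcon)] at hdrop
        simp at hdrop
      have hxi : xs[i]? = some x := by
        have h0 : (xs.drop i)[(0 : Nat)]? = xs[i + 0]? := List.getElem?_drop
        rw [hdrop] at h0
        simpa using h0.symm
      have hgetD : xs.getD i 0 = x := by
        rw [List.getD_eq_getElem _ _ hlt]
        have := List.getElem?_eq_getElem hlt
        rw [hxi] at this
        exact (Option.some_inj.mp this).symm
      have hrest : xs.drop (i + 1) = rest := by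
        rw [← List.tail_drop, hdrop]
        rfl
      have htake : xs.take (i + 1) = xs.take i ++ [x] := by
        rw [List.take_add_one, hxi]
        rfl
      have hlen' : rest.length + 1 ≤ m + 1 := by
        rw [hdrop] at hlen
        simpa using hlen
      by_cases hx : x = 0
      · -- zero at position i: skip it, enlarging the running zero count
        subst hx
        have step : altGo i L (0 :: rest) = altGo (i + 1) (L + 1) rest := by
          simp [altGo]
        rw [step, ← hrest]
        rw [ih (i + 1) (L + 1)
          (by rw [hrest]; omega)
          (by rw [htake, zTail_append_zero, ← hL])
          (Or.inl (by rw [htake, lzRun_append_zero, ← hL]))]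
        rw [show xs.length - i = (xs.length - (i + 1)) + 1 by omega, List.range'_succ]
        have hspec0 : specF xs i = [] := by
          unfold specF
          rw [if_neg (by rw [hgetD]; simp)]
        simp [hspec0]
      · -- nonzero block starting at i
        set b1 := rest.takeWhile (fun y => y != 0) with hb1
        set aft := rest.dropWhile (fun y => y != 0) with haft
        set zs := aft.takeWhile (fun y => y == 0) with hzs
        set rest2 := aft.dropWhile (fun y => y == 0) with hrest2
        have hrsplit : rest = b1 ++ aft := (List.takeWhile_append_dropWhile).symm
        have hasplit : aft = zs ++ rest2 := (List.takeWhile_append_dropWhile).symm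
        have hb1ne : ∀ y ∈ b1, y ≠ 0 := by
          intro y hy
          simpa using List.mem_takeWhile_imp hy
        have hblkne : ∀ y ∈ x :: b1, y ≠ 0 := by
          intro y hy
          rcases List.mem_cons.mp hy with h | h
          · rw [h]; exact hx
          · exact hb1ne y h
        have hzs0 : ∀ y ∈ zs, y = 0 := by
          intro y hy
          simpa using List.mem_takeWhile_imp hy
        have hzsnil : zs = [] → rest2 = [] := by
          intro h
          have h' : (rest.dropWhile (fun y => y != 0)).takeWhile (fun y => y == 0) = [] := by
            rw [← haft, ← hzs]
            exact h
          rw [hrest2, haft, aft_nil_of_zs_nil h']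
          rfl
        have hzHr2 : zHead rest2 = 0 := zHead_of_dropWhile_eq aft rest2 hrest2
        have hr2 : rest2 = [] ∨ rest2.getD 0 0 ≠ 0 := by
          cases hh : rest2 with
          | nil => exact Or.inl rfl
          | cons a t =>
            refine Or.inr ?_
            have hd := List.head?_dropWhile_not (fun y => y == 0) aft
            rw [← hrest2, hh] at hd
            simp at hd
            simpa using hd
        have hdsplit : xs.drop i = (x :: b1) ++ (zs ++ rest2) := by
          rw [hdrop, hrsplit, hasplit]
          simp
        -- abbreviations for the block length and the absolute index after block+zeros
        have hfz : fzRun (zs ++ rest2) = zs.length := by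
          cases hzsc : zs with
          | nil =>
            rw [hzsnil hzsc]
            simp [fzRun, zHead]
          | cons z0 zs' =>
            have hz0 : z0 = 0 := hzs0 z0 (by rw [hzsc]; simp)
            subst hz0
            rw [List.cons_append, fzRun_cons_zero,
              zHead_append_all_zero (fun y hy => hzs0 y (by rw [hzsc]; simp [hy])), hzHr2]
            simp
        have hlendrop : (xs.drop i).length = xs.length - i := List.length_drop
        have hlensum : xs.length - i = (b1.length + 1) + zs.length + rest2.length := by
          have := congrArg List.length hdsplit
          rw [hlendrop] at this
          simp [List.length_append] at this
          omega
        have hdrop2 : xs.drop (i + ((b1.length + 1) + zs.length)) = rest2 := by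
          have h1 : ((x :: b1) ++ zs).length = (b1.length + 1) + zs.length := by
            simp [List.length_append]; omega
          have h2 : (xs.drop i).drop ((b1.length + 1) + zs.length) = rest2 := by
            rw [hdsplit, ← List.append_assoc, ← h1, List.drop_left]
          rw [List.drop_drop] at h2
          rw [← h2]
        have htake2 : xs.take (i + ((b1.length + 1) + zs.length)) = (xs.take i ++ (x :: b1)) ++ zs := by
          rw [List.take_add, hdsplit]
          have h1 : ((x :: b1) ++ (zs ++ rest2)).take ((b1.length + 1) + zs.length) = (x :: b1) ++ zs := by
            rw [← List.append_assoc]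
            have h2 : ((x :: b1) ++ zs).length = (b1.length + 1) + zs.length := by
              simp [List.length_append]; omega
            rw [← h2, List.take_left]
          rw [h1, List.append_assoc]
        have hzT2 : zs.length = zTail (xs.take (i + ((b1.length + 1) + zs.length))) := by
          rw [htake2, zTail_append_all_zero hzs0,
            zTail_append_all_ne_of_ne_nil (List.cons_ne_nil x b1) hblkne]
          omega
        have hlz2 : lzRun (xs.take (i + ((b1.length + 1) + zs.length))) = zs.length ∨
            (xs.drop (i + ((b1.length + 1) + zs.length))).getD 0 0 = 0 := by
          rcases hr2 with h | h
          · right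
            rw [hdrop2, h]
            rfl
          · left
            have hzsne : zs ≠ [] := by
              intro hc
              rw [hzsnil hc] at h
              simp at h
            have hpos : 0 < zs.length := List.length_pos_iff.mpr hzsne
            rw [lzRun_eq_zTail_of_pos (by rw [← hzT2]; omega), ← hzT2]
        have hrec := ih (i + ((b1.length + 1) + zs.length)) zs.length
          (by rw [hdrop2]; omega) hzT2 hlz2
        rw [hdrop2] at hrec
        -- the left-boundary count L is the last zero run of the prefix
        have hlzL : lzRun (xs.take i) = L := by
          rcases hlz with h | h
          · exact h
          · rw [hdrop] at h
            simp [hx] at h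
        -- unfold one step of altGo in the nonzero branch
        have step : altGo i L (x :: rest) =
            (List.range (x :: b1).length).flatMap
              (fun t => (PySem.List.pyRange (-(L : Int)) ((zs.length : Int) + 1) 1).map
                (fun s => (((i + t : Nat) : Int), ((i + t : Nat) : Int) + s)))
            ++ altGo (i + (x :: b1).length + zs.length) zs.length rest2 := by
          simp only [altGo]
          simp [hx, ← hb1, ← haft, ← hzs, ← hrest2]
        rw [step]
        have hlenblk : (x :: b1).length = b1.length + 1 := by simp
        rw [hlenblk]
        rw [show i + (b1.length + 1) + zs.length = i + ((b1.length + 1) + zs.length) by omega]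
        rw [hrec]
        -- split the spec-side range at the block and at the zeros
        rw [hlensum]
        rw [show (b1.length + 1) + zs.length + rest2.length =
          (b1.length + 1) + (zs.length + rest2.length) by omega]
        rw [← List.range'_append_1 (s := i) (m := b1.length + 1) (n := zs.length + rest2.length),
          ← List.range'_append_1 (s := i + (b1.length + 1)) (m := zs.length) (n := rest2.length)]
        rw [List.flatMap_append, List.flatMap_append]
        have hrem : xs.length - (i + ((b1.length + 1) + zs.length)) = rest2.length := by
          omega
        rw [hrem]
        have hmid : (List.range' (i + (b1.length + 1)) zs.length).flatMap (specF xs) = [] := by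
          rw [List.flatMap_eq_nil_iff]
          intro p hp
          rw [List.mem_range'_1] at hp
          have hp0 : xs.getD p 0 = 0 := by
            have hplt : p < xs.length := by omega
            rw [List.getD_eq_getElem _ _ hplt]
            have h1 : xs[p]? = (zs ++ rest2)[p - i - (b1.length + 1)]? := by
              have h2 : (xs.drop i)[p - i]? = xs[i + (p - i)]? := List.getElem?_drop
              rw [show i + (p - i) = p by omega] at h2
              rw [← h2, hdsplit, List.getElem?_append_right (by simp; omega)]
              try congr 1
              try simp
            rw [List.getElem?_append_left (by omega)] at h1
            have hzlt : p - i - (b1.length + 1) < zs.length := by omega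
            rw [List.getElem?_eq_getElem hzlt] at h1
            have hmem : zs[p - i - (b1.length + 1)] ∈ zs := List.getElem_mem hzlt
            rw [List.getElem?_eq_getElem hplt] at h1
            have := hzs0 _ hmem
            rw [← Option.some_inj.mp h1] at this
            exact this
          unfold specF
          rw [if_neg (by rw [hp0]; simp)]
        rw [hmid]
        have hblock : (List.range' i (b1.length + 1)).flatMap (specF xs) =
            (List.range (b1.length + 1)).flatMap
              (fun t => (PySem.List.pyRange (-(L : Int)) ((zs.length : Int) + 1) 1).map
                (fun s => (((i + t : Nat) : Int), ((i + t : Nat) : Int) + s))) := by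
          rw [List.range'_eq_map_range, List.flatMap_map]
          apply List.flatMap_congr
          intro t ht
          rw [List.mem_range] at ht
          have hilt : i + t < xs.length := by omega
          have hblt : t < (x :: b1).length := by simpa using ht
          have hcval : xs.getD (i + t) 0 = (x :: b1)[t] := by
            rw [List.getD_eq_getElem _ _ hilt]
            have h1 : (xs.drop i)[t]? = xs[i + t]? := List.getElem?_drop
            rw [hdsplit, List.getElem?_append_left hblt] at h1
            rw [List.getElem?_eq_getElem hblt] at h1
            rw [List.getElem?_eq_getElem hilt] at h1
            exact (Option.some_inj.mp h1).symm
          have hcne : (x :: b1)[t] ≠ 0 := hblkne _ (List.getElem_mem hblt)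
          have hLrun : Lrun xs (i + t) = L := by
            unfold Lrun
            rw [List.take_add, hdsplit,
              List.take_append_of_le_length (by simpa using Nat.le_of_lt hblt)]
            rw [lzRun_append_all_ne (fun y hy => hblkne y (List.mem_of_mem_take hy))]
            exact hlzL
          have hRrun : Rrun xs (i + t) = zs.length := by
            unfold Rrun
            have h1 : xs.drop (i + t + 1) = (x :: b1).drop (t + 1) ++ (zs ++ rest2) := by
              have h2 : (xs.drop i).drop (t + 1) = xs.drop (i + (t + 1)) := List.drop_drop
              rw [hdsplit] at h2
              rw [show i + t + 1 = i + (t + 1) by omega, ← h2,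
                List.drop_append_of_le_length (by simpa using hblt)]
            rw [h1, fzRun_append_all_ne
              (fun y hy => hblkne y (List.mem_of_mem_drop hy)), hfz]
          simp only [specF, hcval]
          rw [if_pos hcne, hLrun, hRrun]
        rw [hblock,
          show i + (b1.length + 1 + zs.length) = i + (b1.length + 1) + zs.length by omega]
        simp

-- the left_moves / right_moves arrays after the scan, as explicit range-maps
def lmOf (xs : List Int) (n m : Nat) : List Int :=
  (List.range n).map (fun p => if p < m ∧ xs.getD p 0 ≠ 0 then -(Lrun xs p : Int) else 0)

def rmOf (xs : List Int) (n d : Nat) : List Int :=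
  (List.range n).map (fun p => if d ≤ p ∧ xs.getD p 0 ≠ 0 then (Rrun xs p : Int) else 0)

theorem set_map_range {α : Type} (f : Nat → α) (n m : Nat) (v : α) (h : m < n) :
    ((List.range n).map f).set m v = (List.range n).map (fun p => if p = m then v else f p) := by
  apply List.ext_getElem
  · simp
  · intro p h1 h2
    simp only [List.getElem_set, List.getElem_map, List.getElem_range]
    by_cases hp : p = m
    · subst hp; simp
    · rw [if_neg (show ¬ m = p from fun hh => hp hh.symm), if_neg hp]

theorem replicate_eq_map_range {α : Type} (n : Nat) (v : α) :
    List.replicate n v = (List.range n).map (fun _ => v) := by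
  apply List.ext_getElem <;> simp

theorem getElem_getD (xs : List Int) (m : Nat) (h : m < xs.length) :
    xs.getD m 0 = xs[m] := List.getD_eq_getElem xs 0 h

theorem take_succ_eq (xs : List Int) (m : Nat) (h : m < xs.length) :
    xs.take (m + 1) = xs.take m ++ [xs[m]] := by
  rw [List.take_add_one, List.getElem?_eq_getElem h]
  rfl

theorem leftScan_inv (xs : List Int) (m : Nat) (hm : m ≤ xs.length) :
    (List.range m).foldl (aStepL xs)
        (List.replicate xs.length 0, (-1 : Int), (-1 : Int), (0 : Int)) =
      (lmOf xs xs.length m,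
       (m : Int) - 1 - (nzTail (xs.take m) : Int),
       (m : Int) - 1 - (zTail (xs.take m) : Int),
       -(lzRun (xs.take m) : Int)) := by
  induction m with
  | zero =>
    simp only [List.range_zero, List.foldl_nil, List.take_zero, Prod.mk.injEq]
    refine ⟨?_, by norm_num [nzTail, nzHead], by norm_num [zTail, zHead],
      by norm_num [lzRun, fzRun, zHead]⟩
    rw [lmOf, replicate_eq_map_range]
    apply List.map_congr_left
    intro p _
    simp
  | succ m ih =>
    have hmlt : m < xs.length := by omega
    rw [List.range_succ, List.foldl_append, List.foldl_cons, List.foldl_nil,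
      ih (by omega)]
    have htake := take_succ_eq xs m hmlt
    have hgd : xs.getD m 0 = xs[m] := getElem_getD xs m hmlt
    simp only [aStepL]
    by_cases hv : xs[m] = 0
    · rw [if_neg (by rw [hgd, hv]; simp)]
      simp only [Prod.mk.injEq]
      refine ⟨?_, ?_, ?_, ?_⟩
      · rw [lmOf, lmOf]
        apply List.map_congr_left
        intro p hp
        by_cases hpm : p = m
        · subst hpm
          rw [if_neg (by rw [hgd, hv]; simp), if_neg (by rw [hgd, hv]; simp)]
        · have hpm2 : (p < m) ↔ (p < m + 1) := by omega
          simp only [hpm2]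
      · rw [htake, hv, nzTail_append_zero]
        push_cast
        ring
      · rw [htake, hv, zTail_append_zero]
        push_cast
        ring
      · rw [htake, hv, lzRun_append_zero]
        push_cast
        ring
    · rw [if_pos (by rw [hgd]; simpa using hv)]
      simp only [Prod.mk.injEq]
      refine ⟨?_, ?_, ?_, ?_⟩
      · rw [lmOf, lmOf, set_map_range _ _ _ _ hmlt]
        apply List.map_congr_left
        intro p hp
        by_cases hpm : p = m
        · subst hpm
          rw [if_pos rfl, if_pos ⟨by omega, by rw [hgd]; exact hv⟩]
          rfl
        · rw [if_neg hpm]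
          have hpm2 : (p < m) ↔ (p < m + 1) := by omega
          simp only [hpm2]
      · rw [htake, nzTail_append_ne hv]
        push_cast
        ring
      · rw [htake, zTail_append_ne hv]
        push_cast
        ring
      · rw [htake, lzRun_append_all_ne (by intro y hy; simp at hy; rw [hy]; exact hv)]

theorem rightScan_inv (xs : List Int) (m : Nat) (hm : m ≤ xs.length) :
    (List.range m).foldl (aStepR xs xs.length)
        (List.replicate xs.length 0, (xs.length : Int), (xs.length : Int), (0 : Int)) =
      (rmOf xs xs.length (xs.length - m),
       ((xs.length - m : Nat) : Int) + (nzHead (xs.drop (xs.length - m)) : Int),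
       ((xs.length - m : Nat) : Int) + (zHead (xs.drop (xs.length - m)) : Int),
       (fzRun (xs.drop (xs.length - m)) : Int)) := by
  induction m with
  | zero =>
    simp only [List.range_zero, List.foldl_nil, Nat.sub_zero, List.drop_length,
      Prod.mk.injEq]
    refine ⟨?_, by norm_num [nzHead], by norm_num [zHead], by norm_num [fzRun, zHead]⟩
    rw [rmOf, replicate_eq_map_range]
    apply List.map_congr_left
    intro p hp
    rw [List.mem_range] at hp
    rw [if_neg (fun hc => absurd hc.1 (by omega))]
  | succ m ih =>
    have hmlt : m < xs.length := by omega
    have hjlt : xs.length - 1 - m < xs.length := by omega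
    have hj1 : xs.length - 1 - m + 1 = xs.length - m := by omega
    have hj2 : xs.length - (m + 1) = xs.length - 1 - m := by omega
    rw [List.range_succ, List.foldl_append, List.foldl_cons, List.foldl_nil,
      ih (by omega), hj2]
    have hdropj : xs.drop (xs.length - 1 - m) =
        xs[xs.length - 1 - m] :: xs.drop (xs.length - m) := by
      rw [List.drop_eq_getElem_cons hjlt, hj1]
    have hgd : xs.getD (xs.length - 1 - m) 0 = xs[xs.length - 1 - m] :=
      getElem_getD xs _ hjlt
    simp only [aStepR]
    by_cases hv : xs[xs.length - 1 - m] = 0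
    · rw [if_neg (by rw [hgd, hv]; simp)]
      simp only [Prod.mk.injEq]
      refine ⟨?_, ?_, ?_, ?_⟩
      · rw [rmOf, rmOf]
        apply List.map_congr_left
        intro p hp
        rw [List.mem_range] at hp
        by_cases hpj : p = xs.length - 1 - m
        · subst hpj
          rw [if_neg (fun hc => hc.2 (by rw [hgd]; exact hv)),
            if_neg (fun hc => hc.2 (by rw [hgd]; exact hv))]
        · have hiff : (xs.length - m ≤ p) ↔ (xs.length - 1 - m ≤ p) := by omega
          simp only [hiff]
      · rw [hdropj, hv, nzHead_cons_zero]
        simp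
      · rw [hdropj, hv, zHead_cons_zero]
        omega
      · rw [hdropj, hv, fzRun_cons_zero]
        omega
    · rw [if_pos (by rw [hgd]; simpa using hv)]
      simp only [Prod.mk.injEq]
      refine ⟨?_, ?_, ?_, ?_⟩
      · rw [rmOf, rmOf, set_map_range _ _ _ _ hjlt]
        apply List.map_congr_left
        intro p hp
        rw [List.mem_range] at hp
        by_cases hpj : p = xs.length - 1 - m
        · subst hpj
          rw [if_pos rfl, if_pos ⟨by omega, by rw [hgd]; exact hv⟩]
          simp only [Rrun, hj1]
        · rw [if_neg hpj]
          have hiff : (xs.length - m ≤ p) ↔ (xs.length - 1 - m ≤ p) := by omega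
          simp only [hiff]
      · rw [hdropj, nzHead_cons_ne hv]
        omega
      · rw [hdropj, zHead_cons_ne hv]
        simp
      · rw [hdropj, fzRun_cons_ne hv]

theorem lemA (xs : List Int) :
    available_moves_by_line_py xs = (List.range xs.length).flatMap (specF xs) := by
  have hcong : ∀ (acc : List (Int × Int)) (i : Nat), i ∈ List.range xs.length →
      (if xs.getD i 0 ≠ 0 then
        acc ++ (PySem.List.pyRange ((lmOf xs xs.length xs.length).getD i 0)
          ((rmOf xs xs.length 0).getD i 0 + 1) 1).map
            (fun step => ((i : Int), (i : Int) + step))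
      else acc) = acc ++ specF xs i := by
    intro acc i hi
    rw [List.mem_range] at hi
    by_cases hz : xs.getD i 0 ≠ 0
    · rw [if_pos hz]
      unfold specF
      rw [if_pos hz, lmOf, rmOf, PySem.List.getD_map_range _ _ _ _ hi,
        PySem.List.getD_map_range _ _ _ _ hi, if_pos ⟨hi, hz⟩,
        if_pos ⟨Nat.zero_le i, hz⟩]
    · rw [if_neg hz]
      unfold specF
      rw [if_neg hz, List.append_nil]
  unfold available_moves_by_line_py
  simp only [PySem.List.foldl_prod_mk (f := aStepL xs) (g := aStepR xs xs.length),
    leftScan_inv xs xs.length le_rfl, rightScan_inv xs xs.length le_rfl, Nat.sub_self]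
  refine Eq.trans (PySem.List.foldl_congr_mem _ _
    (fun moves i => moves ++ specF xs i) _ hcong) ?_
  rw [PySem.List.foldl_append_eq_flatMap]
  simp

theorem lemB (xs : List Int) :
    available_moves_by_line_py_alt xs = (List.range xs.length).flatMap (specF xs) := by
  unfold available_moves_by_line_py_alt
  have h := altGo_eq xs xs.length 0 0 (by simp) rfl (Or.inl rfl)
  simpa [List.range_eq_range'] using h

-- ===== VERDICT (by name: the statement is the Claim_ definition above) =====
theorem available_moves_by_line_py_spec : Claim_equal_available_moves_by_line_py := by
  intro xs _
  unfold Spec_available_moves_by_line_py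
  rw [lemA, lemB]
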